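-- pv_equiv track=rewrite | github.com/UKPLab/arxiv2018-bayesian-ensembles | src/baselines/hmmcrowd.py | list_entities
-- ===== SOURCE A (Python) =====
-- def list_entities(sen, st, inside):
--     """
--     list the occurence of an entity
--     """
--     n = len(sen)
--     res = []
--     i = 0
--     while i < n:
--         if sen[i] == st:
--             x = i
--             i += 1
--             while i < n and sen[i] == inside:
--                 i += 1
--             res.append((x, i - 1))
--         else:
--             i += 1
--     return res
-- ===== SOURCE B (Python) =====
-- def list_entities(sen, st, inside):
--     """
--     list the occurence of an entity
--     """
--     res = []
--     start = None
--     for i, tag in enumerate(sen):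
--         if start is not None and tag != inside:
--             res.append((start, i - 1))
--             start = None
--         if start is None and tag == st:
--             start = i
--     if start is not None:
--         res.append((start, len(sen) - 1))
--     return res
-- ===== Notes on version B (the rewrite author's own statement) =====
-- stated objective: simpler
-- what changed: Replaced the index-driven outer while with a nested inner while and manual index advancement by a single flat enumerate pass maintaining an Optional open-span start state, flushed once after the loop.
import Mathlib
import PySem

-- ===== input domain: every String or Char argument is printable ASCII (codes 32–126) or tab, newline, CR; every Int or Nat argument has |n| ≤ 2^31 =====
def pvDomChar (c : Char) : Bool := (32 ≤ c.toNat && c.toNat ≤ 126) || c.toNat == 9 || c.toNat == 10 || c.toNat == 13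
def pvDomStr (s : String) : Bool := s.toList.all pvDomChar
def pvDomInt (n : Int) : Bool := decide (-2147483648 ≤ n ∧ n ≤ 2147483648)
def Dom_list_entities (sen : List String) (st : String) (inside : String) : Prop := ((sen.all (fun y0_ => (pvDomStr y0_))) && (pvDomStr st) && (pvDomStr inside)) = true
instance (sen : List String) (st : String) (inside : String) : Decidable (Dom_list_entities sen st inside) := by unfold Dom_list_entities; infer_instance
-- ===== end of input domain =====

-- B replaces A's nested while loops and manual index advancement by one flat
-- enumerate pass with an Option "open span start" state, flushed after the loop
-- (objective: simpler; same O(n) cost; return values proved equal on all inputs).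

-- ===== PORT A =====
-- inner while: 'while i < n and sen[i] == inside: i += 1' — returns the final i
def innerA (sen : List String) (inside : String) (i : Nat) : Nat :=
  if h : i < sen.length then
    if sen[i] = inside then innerA sen inside (i + 1) else i
  else i
termination_by sen.length - i

-- needed by outerA's termination proof
theorem le_innerA (sen : List String) (inside : String) (i : Nat) :
    i ≤ innerA sen inside i := by
  unfold innerA
  split
  · split
    · exact le_trans (Nat.le_succ i) (le_innerA sen inside (i + 1))
    · exact le_refl i
  · exact le_refl i
termination_by sen.length - i

-- outer while over index i accumulating res
def outerA (sen : List String) (st inside : String) (i : Nat) (res : List (Int × Int)) :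
    List (Int × Int) :=
  if h : i < sen.length then
    if sen[i] = st then
      let x := i
      let j := innerA sen inside (i + 1)
      outerA sen st inside j (res ++ [((x : Int), (j : Int) - 1)])
    else outerA sen st inside (i + 1) res
  else res
termination_by sen.length - i
decreasing_by
  · have := le_innerA sen inside (i + 1); omega
  · omega

def list_entities (sen : List String) (st : String) (inside : String) : List (Int × Int) :=
  outerA sen st inside 0 []

-- ===== PORT B =====
-- loop body of Source B: optionally close the open span, then optionally open one
def stepB (st inside : String) (p : List (Int × Int) × Option Int) (it : Int × String) :
    List (Int × Int) × Option Int :=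
  let q : List (Int × Int) × Option Int :=
    match p.2 with
    | some s => if it.2 ≠ inside then (p.1 ++ [(s, it.1 - 1)], none) else p
    | none => p
  match q.2 with
  | none => if it.2 = st then (q.1, some it.1) else q
  | some _ => q

def list_entities_alt (sen : List String) (st : String) (inside : String) : List (Int × Int) :=
  let r := (PySem.List.enumerate sen 0).foldl (stepB st inside) ([], none)
  match r.2 with
  | some s => r.1 ++ [(s, (sen.length : Int) - 1)]
  | none => r.1

-- ===== PRECONDITION & SPEC =====
def Spec_list_entities (sen : List String) (st : String) (inside : String) (out : List (Int × Int)) : Prop := out = list_entities_alt sen st inside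
instance (sen : List String) (st : String) (inside : String) (out : List (Int × Int)) : Decidable (Spec_list_entities sen st inside out) := by unfold Spec_list_entities; infer_instance

-- ===== CLAIM (what is proved, stated in full; the proofs are below) =====
def Claim_equal_list_entities : Prop := ∀ (sen : List String) (st : String) (inside : String), Dom_list_entities sen st inside → Spec_list_entities sen st inside (list_entities sen st inside)

-- ===== LEMMAS AND PROOFS =====

-- the post-loop flush of Source B, as a named helper for the proofs
def flushB (n : Nat) (r : List (Int × Int) × Option Int) : List (Int × Int) :=
  match r.2 with
  | some s => r.1 ++ [(s, (n : Int) - 1)]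
  | none => r.1

theorem alt_eq_flush (sen : List String) (st inside : String) :
    list_entities_alt sen st inside =
      flushB sen.length ((PySem.List.enumerate sen 0).foldl (stepB st inside) ([], none)) := rfl

theorem innerA_le (sen : List String) (inside : String) (i : Nat) (h : i ≤ sen.length) :
    innerA sen inside i ≤ sen.length := by
  unfold innerA
  split
  · split
    · exact innerA_le sen inside (i + 1) (by omega)
    · exact h
  · exact h
termination_by sen.length - i

-- B's fold, from an OPEN span (start = some s) at position i, equals closing the
-- span at j - 1 (j = where A's inner while stops) and continuing closed from j.
theorem inner_agree (sen : List String) (st inside : String) (i : Nat) (hle : i ≤ sen.length)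
    (s : Int) (res : List (Int × Int)) :
    flushB sen.length
        ((PySem.List.enumerate (sen.drop i) (i : Int)).foldl (stepB st inside) (res, some s)) =
      flushB sen.length
        ((PySem.List.enumerate (sen.drop (innerA sen inside i)) ((innerA sen inside i : Int))).foldl
          (stepB st inside)
          (res ++ [(s, (innerA sen inside i : Int) - 1)], none)) := by
  by_cases h : i < sen.length
  · rw [List.drop_eq_getElem_cons h, PySem.List.enumerate_cons]
    by_cases hin : sen[i] = inside
    · have hi : innerA sen inside i = innerA sen inside (i + 1) := by
        conv_lhs => rw [innerA]
        simp [h, hin]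
      rw [hi]
      have hstep : stepB st inside (res, some s) ((i : Int), sen[i]) = (res, some s) := by
        simp [stepB, hin]
      rw [List.foldl_cons, hstep]
      have := inner_agree sen st inside (i + 1) (by omega) s res
      simpa using this
    · have hi : innerA sen inside i = i := by
        unfold innerA; simp [h, hin]
      rw [hi, List.drop_eq_getElem_cons h, PySem.List.enumerate_cons]
      rw [List.foldl_cons, List.foldl_cons]
      have hstep : stepB st inside (res, some s) ((i : Int), sen[i]) =
          stepB st inside (res ++ [(s, (i : Int) - 1)], none) ((i : Int), sen[i]) := by
        simp [stepB, hin]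
      rw [hstep]
  · have hi : i = sen.length := by omega
    have hA : innerA sen inside i = i := by unfold innerA; simp [h]
    subst hi
    rw [hA]
    simp [flushB]
termination_by sen.length - i

-- main invariant: A's outer loop from index i with accumulator res equals B's
-- fold over the remaining enumerated suffix started with a CLOSED span, then flushed.
theorem main_agree (sen : List String) (st inside : String) (i : Nat) (hle : i ≤ sen.length)
    (res : List (Int × Int)) :
    outerA sen st inside i res =
      flushB sen.length
        ((PySem.List.enumerate (sen.drop i) (i : Int)).foldl (stepB st inside) (res, none)) := by
  by_cases h : i < sen.length
  · rw [List.drop_eq_getElem_cons h, PySem.List.enumerate_cons, List.foldl_cons]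
    by_cases hst : sen[i] = st
    · have hstep : stepB st inside (res, none) ((i : Int), sen[i]) = (res, some (i : Int)) := by
        simp [stepB, hst]
      rw [hstep]
      have hinner := inner_agree sen st inside (i + 1) (by omega) (i : Int) res
      have hj := le_innerA sen inside (i + 1)
      have hjle := innerA_le sen inside (i + 1) (by omega)
      have hA : outerA sen st inside i res =
          outerA sen st inside (innerA sen inside (i + 1))
            (res ++ [((i : Int), ((innerA sen inside (i + 1) : Nat) : Int) - 1)]) := by
        conv_lhs => rw [outerA]
        simp [h, hst]
      rw [hA]
      rw [main_agree sen st inside (innerA sen inside (i + 1)) hjle]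
      simpa using hinner.symm
    · have hstep : stepB st inside (res, none) ((i : Int), sen[i]) = (res, none) := by
        simp [stepB, hst]
      rw [hstep]
      have hA : outerA sen st inside i res = outerA sen st inside (i + 1) res := by
        conv_lhs => rw [outerA]
        simp [h, hst]
      rw [hA]
      have := main_agree sen st inside (i + 1) (by omega) res
      simpa using this
  · have hi : i = sen.length := by omega
    subst hi
    rw [outerA]
    simp [flushB]
termination_by sen.length - i

-- ===== VERDICT (by name: the statement is the Claim_ definition above) =====
theorem list_entities_spec : Claim_equal_list_entities := by
  intro sen st inside _
  unfold Spec_list_entities list_entities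
  rw [alt_eq_flush]
  have := main_agree sen st inside 0 (Nat.zero_le _) []
  simpa using this
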